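-- pv_equiv track=rewrite | github.com/lake041/sesac-algorithm | 이소민/Programmers/3/인사고과.py | solution
-- ===== SOURCE A (Python) =====
-- def solution(scores):
--     wanho, scores = scores[0], scores[1:]
--     wanho_wa, wanho_pr = wanho
--     limit_pr = 0
--     rank = 1
--
--     for work_attitude, peer_review in sorted(scores, key=lambda s: (-s[0], s[1])):
--         if wanho_wa < work_attitude and wanho_pr < peer_review:
--             return -1
--
--         if limit_pr <= peer_review:
--             limit_pr = peer_review
--
--             if wanho_wa + wanho_pr < work_attitude + peer_review:
--                 rank += 1
--
--     return rank
-- ===== SOURCE B (Python) =====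
-- def solution(scores):
--     wanho, others = scores[0], scores[1:]
--     ww, wp = wanho
--     if any(fa > ww and fp > wp for fa, fp in others):
--         return -1
--     rank = 1
--     for ea, ep in others:
--         if ea + ep > ww + wp and not any(fa > ea and fp > ep for fa, fp in others):
--             rank += 1
--     return rank
-- ===== Notes on version B (the rewrite author's own statement) =====
-- stated objective: alternative
-- what changed: Replaces the sort by (-attitude, peer) plus running-max scan with an unsorted nested dominance scan: an employee raises Wanho's rank iff no colleague strictly beats it on both scores and its total exceeds Wanho's.
-- intended difference: When no colleague strictly dominates Wanho and some colleague has a negative peer score, is strictly dominated by nobody, and has a total above Wanho's, A fails to count it (its running max limit_pr starts at 0, silently skipping negative peer scores) while B counts it; B's rank is the intended one since a score's sign should not affect dominance. — e.g. on solution([[0, 0], [5, -1]]): A returns 1, B returns 2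
-- outside the precondition, e.g. on solution([[0, 0], [1, 2, 3], [5, 5]]): A returns -1, B raises ValueError
import Mathlib
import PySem

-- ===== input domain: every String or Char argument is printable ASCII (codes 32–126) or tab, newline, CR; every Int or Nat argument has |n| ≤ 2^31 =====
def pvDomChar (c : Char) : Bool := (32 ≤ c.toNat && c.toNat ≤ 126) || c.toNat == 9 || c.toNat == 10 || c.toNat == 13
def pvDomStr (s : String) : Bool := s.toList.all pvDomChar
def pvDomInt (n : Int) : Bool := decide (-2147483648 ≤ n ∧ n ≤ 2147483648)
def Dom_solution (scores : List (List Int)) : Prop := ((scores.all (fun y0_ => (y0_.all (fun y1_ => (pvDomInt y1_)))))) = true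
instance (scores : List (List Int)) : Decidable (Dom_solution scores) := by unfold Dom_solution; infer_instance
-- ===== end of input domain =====

-- B replaces A's sort by (-attitude, peer) plus running-max scan with an unsorted nested strict-dominance scan (alternative algorithm, equal results outside D_).

-- ===== PORT A =====
-- row[0] / row[1]; exact on Pre_ rows (length 2)
def pvG0 (r : List Int) : Int := PySem.List.pyGetD r 0 0
def pvG1 (r : List Int) : Int := PySem.List.pyGetD r 1 0
-- 'f[0] > e[0] and f[1] > e[1]' (f strictly beats e on both scores), and a row's total
abbrev pvBeats (f e : List Int) : Prop := pvG0 e < pvG0 f ∧ pvG1 e < pvG1 f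
def pvSum (r : List Int) : Int := pvG0 r + pvG1 r
-- Python's sort key lambda s: (-s[0], s[1]); tuple comparison is lexicographic
def pvKey (s : List Int) : Int ×ₗ Int := toLex (-(pvG0 s), pvG1 s)

-- the for-loop of A, with early return -1 and state (limit_pr, rank); w is the wanho row
def pvALoop (w : List Int) : List (List Int) → Int → Int → Int
  | [], _, rank => rank
  | r :: rest, limit, rank =>
    if pvBeats r w then -1
    else if limit ≤ pvG1 r then
      pvALoop w rest (pvG1 r) (if pvSum w < pvSum r then rank + 1 else rank)
    else pvALoop w rest limit rank

def solution (scores : List (List Int)) : Int :=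
  let wanho := PySem.List.pyGetD scores 0 []          -- scores[0]; Pre_ gives scores ≠ []
  let rest := PySem.List.slice scores (some 1) none   -- scores[1:]
  pvALoop wanho (PySem.List.sorted rest pvKey) 0 1

-- ===== PORT B =====
def solution_alt (scores : List (List Int)) : Int :=
  match scores with
  | [] => 0   -- unreachable under Pre_ (Source B raises IndexError on scores[0])
  | wanho :: others =>
    if ∃ f ∈ others, pvBeats f wanho then -1
    else others.foldl (fun rank e =>
      if pvSum wanho < pvSum e ∧ ∀ f ∈ others, ¬pvBeats f e
      then rank + 1 else rank) 1

-- ===== PRECONDITION & SPEC =====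
-- Pre_ excludes the empty list and malformed rows (length ≠ 2): there A raises (IndexError /
-- ValueError on unpacking), except that A may return -1 before reaching a malformed row when a
-- dominating row sorts earlier — an accident of sort order; B raises on those inputs too.
def Pre_solution (scores : List (List Int)) : Prop :=
  scores ≠ [] ∧ ∀ r ∈ scores, r.length = 2
instance (scores : List (List Int)) : Decidable (Pre_solution scores) := by
  unfold Pre_solution; infer_instance
def pvWitness_solution : List (List Int) := [[2, 2], [1, 4], [3, 2], [2, 1]]

-- When no colleague strictly dominates Wanho and some colleague has a negative peer score, is
-- strictly dominated by nobody, and has a total above Wanho's, A fails to count it (its running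
-- max limit_pr starts at 0, silently skipping negative peer scores) while B counts it; B's rank
-- is the intended one since a score's sign should not affect dominance.
def D_solution (scores : List (List Int)) : Prop :=
  scores ≠ [] ∧ ∃ e ∈ scores.tail, pvG1 e < 0 ∧ pvSum (scores.headD []) < pvSum e ∧
    ∀ f ∈ scores.tail, ¬pvBeats f e ∧ ¬pvBeats f (scores.headD [])
instance (scores : List (List Int)) : Decidable (D_solution scores) := by
  unfold D_solution; infer_instance

def Spec_solution (scores : List (List Int)) (out : Int) : Prop :=
  ¬ D_solution scores → out = solution_alt scores
instance (scores : List (List Int)) (out : Int) : Decidable (Spec_solution scores out) := by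
  unfold Spec_solution; infer_instance

def pvDiffWitness_solution : List (List Int) := [[0, 0], [5, -1]]
def pvDiffWitnessOut_solution : Int × Int := (1, 2)

-- ===== CLAIM (what is proved, stated in full; the proofs are below) =====
def Claim_unchanged_solution : Prop := ∀ (scores : List (List Int)), Dom_solution scores →
  Pre_solution scores → Spec_solution scores (solution scores)
def Claim_changed_solution : Prop := Dom_solution (pvDiffWitness_solution) ∧
  Pre_solution (pvDiffWitness_solution) ∧ D_solution (pvDiffWitness_solution) ∧
  solution (pvDiffWitness_solution) = pvDiffWitnessOut_solution.1 ∧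
  solution_alt (pvDiffWitness_solution) = pvDiffWitnessOut_solution.2 ∧
  pvDiffWitnessOut_solution.1 ≠ pvDiffWitnessOut_solution.2
def Claim_exact_solution : Prop := ∀ (scores : List (List Int)), Dom_solution scores →
  Pre_solution scores → D_solution scores → solution scores ≠ solution_alt scores

-- ===== LEMMAS AND PROOFS =====

theorem pvKey_le_iff (r f : List Int) :
    pvKey r ≤ pvKey f ↔ (pvG0 f < pvG0 r ∨ (pvG0 f = pvG0 r ∧ pvG1 r ≤ pvG1 f)) := by
  simp only [pvKey, Prod.Lex.toLex_le_toLex]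
  constructor <;> (intro h; omega)

-- A's scan over a key-sorted list = early -1 on a dominator of wanho, else rank plus the number
-- of elements whose peer clears the running max (with floor `limit`) and whose total beats wanho's.
theorem pvALoop_eq (w : List Int) :
    ∀ (L : List (List Int)), L.Pairwise (fun a b => pvKey a ≤ pvKey b) → ∀ (limit rank : Int),
    pvALoop w L limit rank =
      if ∃ f ∈ L, pvBeats f w then -1
      else rank + (L.countP (fun e => decide (limit ≤ pvG1 e ∧ pvSum w < pvSum e ∧
               ∀ f ∈ L, ¬pvBeats f e)) : Int) := by
  intro L
  induction L with
  | nil => intro _ limit rank; simp [pvALoop]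
  | cons r rest ih =>
    intro hp limit rank
    rcases List.pairwise_cons.1 hp with ⟨hhd, htl⟩
    have hnodr : ∀ f ∈ r :: rest, ¬pvBeats f r := by
      intro f hf
      rcases List.mem_cons.1 hf with rfl | hf'
      · unfold pvBeats; omega
      · have := (pvKey_le_iff r f).1 (hhd f hf')
        unfold pvBeats; omega
    by_cases hdom : pvBeats r w
    · rw [show pvALoop w (r :: rest) limit rank = -1 by simp [pvALoop, hdom],
          if_pos ⟨r, List.mem_cons_self, hdom⟩]
    · have hex : (∃ f ∈ r :: rest, pvBeats f w) ↔ (∃ f ∈ rest, pvBeats f w) := by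
        constructor
        · rintro ⟨f, hf, h⟩
          rcases List.mem_cons.1 hf with rfl | hf'
          · exact absurd h hdom
          · exact ⟨f, hf', h⟩
        · rintro ⟨f, hf, h⟩
          exact ⟨f, List.mem_cons_of_mem r hf, h⟩
      by_cases hlim : limit ≤ pvG1 r
      · rw [show pvALoop w (r :: rest) limit rank =
              pvALoop w rest (pvG1 r)
                (if pvSum w < pvSum r then rank + 1 else rank) by
            simp [pvALoop, hdom, hlim]]
        rw [ih htl (pvG1 r) _]
        simp only [hex]
        refine if_congr Iff.rfl rfl ?_
        rw [List.countP_cons]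
        have htail : List.countP (fun e => decide (pvG1 r ≤ pvG1 e ∧
              pvSum w < pvSum e ∧ ∀ f ∈ rest, ¬pvBeats f e)) rest =
            List.countP (fun e => decide (limit ≤ pvG1 e ∧
              pvSum w < pvSum e ∧ ∀ f ∈ r :: rest, ¬pvBeats f e)) rest := by
          apply List.countP_congr
          intro e he
          simp only [decide_eq_true_eq]
          have hkey := (pvKey_le_iff r e).1 (hhd e he)
          rw [List.forall_mem_cons]
          unfold pvBeats
          constructor
          · rintro ⟨h1, h2, h3⟩
            refine ⟨by omega, h2, by omega, ?_⟩
            intro f hf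
            exact h3 f hf
          · rintro ⟨h1, h2, h3, h4⟩
            refine ⟨by omega, h2, ?_⟩
            intro f hf
            exact h4 f hf
        rw [htail]
        have hhead : (if (decide (limit ≤ pvG1 r ∧ pvSum w < pvSum r ∧
            ∀ f ∈ r :: rest, ¬pvBeats f r)) = true then (1 : Nat)
            else 0) = if pvSum w < pvSum r then 1 else 0 := by
          by_cases hs : pvSum w < pvSum r
          · rw [if_pos (decide_eq_true ⟨hlim, hs, hnodr⟩), if_pos hs]
          · rw [if_neg (fun hc => hs (of_decide_eq_true hc).2.1), if_neg hs]
        rw [hhead]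
        by_cases hs : pvSum w < pvSum r
        · rw [if_pos hs, if_pos hs]; push_cast; omega
        · rw [if_neg hs, if_neg hs]; push_cast; omega
      · rw [show pvALoop w (r :: rest) limit rank = pvALoop w rest limit rank by
            simp [pvALoop, hdom, hlim]]
        rw [ih htl limit rank]
        simp only [hex]
        refine if_congr Iff.rfl rfl ?_
        rw [List.countP_cons]
        have htail : List.countP (fun e => decide (limit ≤ pvG1 e ∧
              pvSum w < pvSum e ∧ ∀ f ∈ rest, ¬pvBeats f e)) rest =
            List.countP (fun e => decide (limit ≤ pvG1 e ∧
              pvSum w < pvSum e ∧ ∀ f ∈ r :: rest, ¬pvBeats f e)) rest := by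
          apply List.countP_congr
          intro e he
          simp only [decide_eq_true_eq]
          rw [List.forall_mem_cons]
          unfold pvBeats
          constructor
          · rintro ⟨h1, h2, h3⟩
            exact ⟨h1, h2, by omega, h3⟩
          · rintro ⟨h1, h2, h3, h4⟩
            exact ⟨h1, h2, h4⟩
        rw [htail]
        have hhead : (if (decide (limit ≤ pvG1 r ∧ pvSum w < pvSum r ∧
            ∀ f ∈ r :: rest, ¬pvBeats f r)) = true then (1 : Nat)
            else 0) = 0 :=
          if_neg (fun hc => hlim (of_decide_eq_true hc).1)
        rw [hhead]
        push_cast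
        omega

theorem pvCountP_lt {α : Type} (l : List α) (p q : α → Bool)
    (hmono : ∀ x ∈ l, p x = true → q x = true) (e : α) (he : e ∈ l)
    (hp : p e = false) (hq : q e = true) : l.countP p < l.countP q := by
  induction l with
  | nil => cases he
  | cons x t ih =>
    rw [List.countP_cons, List.countP_cons]
    rcases List.mem_cons.1 he with rfl | het
    · have hle : t.countP p ≤ t.countP q :=
        List.countP_mono_left (fun y hy => hmono y (List.mem_cons_of_mem e hy))
      rw [hp, hq]
      simp only [Bool.false_eq_true, if_false, if_true]
      omega
    · have h1 := ih (fun y hy h => hmono y (List.mem_cons_of_mem x hy) h) het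
      have h2 : (if p x = true then 1 else 0) ≤ (if q x = true then 1 else 0) := by
        cases hpx : p x with
        | false => cases hqx : q x <;> simp
        | true => rw [if_pos rfl, hmono x List.mem_cons_self hpx, if_pos rfl]
      omega

theorem solution_eq_main (w : List Int) (others : List (List Int)) :
    solution (w :: others) =
      if ∃ f ∈ others, pvBeats f w then -1
      else 1 + (others.countP (fun e => decide (0 ≤ pvG1 e ∧
               pvSum w < pvSum e ∧ ∀ f ∈ others, ¬pvBeats f e)) : Int) := by
  simp only [solution, PySem.List.pyGetD_zero_cons, PySem.List.slice_from_one, List.tail_cons]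
  rw [pvALoop_eq _ _ (PySem.List.sorted_pairwise _ _)]
  simp only [PySem.List.mem_sorted]
  refine if_congr Iff.rfl rfl ?_
  congr 1
  exact_mod_cast List.Perm.countP_eq _ (PySem.List.sorted_perm others pvKey false)

theorem solution_alt_eq_main (w : List Int) (others : List (List Int)) :
    solution_alt (w :: others) =
      if ∃ f ∈ others, pvBeats f w then -1
      else 1 + (others.countP (fun e => decide (
               pvSum w < pvSum e ∧ ∀ f ∈ others, ¬pvBeats f e)) : Int) := by
  simp only [solution_alt]
  refine if_congr Iff.rfl rfl ?_
  rw [PySem.List.foldl_ite_add_one]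

-- ===== VERDICT (by name: the statement is the Claim_ definition above) =====
theorem solution_spec : Claim_unchanged_solution := by
  intro scores _hdom hpre hnd
  obtain ⟨hne, hlen⟩ := hpre
  rcases scores with _ | ⟨w, others⟩
  · exact absurd rfl hne
  · rw [solution_eq_main, solution_alt_eq_main]
    by_cases hex : ∃ f ∈ others, pvBeats f w
    · rw [if_pos hex, if_pos hex]
    · rw [if_neg hex, if_neg hex]
      have hc : List.countP (fun e => decide (0 ≤ pvG1 e ∧
            pvSum w < pvSum e ∧ ∀ f ∈ others, ¬pvBeats f e)) others =
          List.countP (fun e => decide (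
            pvSum w < pvSum e ∧ ∀ f ∈ others, ¬pvBeats f e)) others := by
        apply List.countP_congr
        intro e he
        simp only [decide_eq_true_eq]
        constructor
        · rintro ⟨h0, h2, h3⟩
          exact ⟨h2, h3⟩
        · rintro ⟨h2, h3⟩
          by_cases h0 : 0 ≤ pvG1 e
          · exact ⟨h0, h2, h3⟩
          · exact absurd (show D_solution (w :: others) from
              ⟨List.cons_ne_nil w others,
               e, he, by omega, h2,
               fun f hf => ⟨h3 f hf, fun hdf => hex ⟨f, hf, hdf⟩⟩⟩) hnd
      rw [hc]

theorem solution_changed : Claim_changed_solution := by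
  unfold Claim_changed_solution; decide

theorem solution_tight : Claim_exact_solution := by
  intro scores _hdom hpre hd
  obtain ⟨hne, -⟩ := hpre
  rcases scores with _ | ⟨w, others⟩
  · exact absurd rfl hne
  · obtain ⟨-, e, he, hneg, hsum, hall⟩ := hd
    rw [solution_eq_main, solution_alt_eq_main]
    have hex : ¬ ∃ f ∈ others, pvBeats f w := by
      rintro ⟨f, hf, h⟩
      exact (hall f hf).2 h
    rw [if_neg hex, if_neg hex]
    have hlt := pvCountP_lt others
      (fun e => decide (0 ≤ pvG1 e ∧ pvSum w < pvSum e ∧ ∀ f ∈ others, ¬pvBeats f e))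
      (fun e => decide (pvSum w < pvSum e ∧ ∀ f ∈ others, ¬pvBeats f e))
      (fun x hx h => by
        simp only [decide_eq_true_eq] at h ⊢
        exact ⟨h.2.1, h.2.2⟩)
      e he
      (decide_eq_false (fun hc => absurd hc.1 (by omega)))
      (decide_eq_true ⟨hsum, fun f hf => (hall f hf).1⟩)
    intro hcontra
    omega
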